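-- pv_equiv track=rewrite | github.com/Arcaru24601/CommunityFirnThesis | Python/untitled6.py | folder_gen
-- ===== SOURCE A (Python) =====
-- def folder_gen(fold,FileFlag):
--     X = ['Long/']
--     X2 = ['HLdynamic/','HLSigfus/','Barnola1991/','Goujon2003/']
--     Y = ['Darcy/']
--     if FileFlag == True:
--         X = [x[:-1] for x in X]
--         X2 = [x[:-1] for x in X2]
--         Y = [x[:-1] for x in Y]
--     Z = [fold]
--     Folder = [(i+i2+j+k) for i in X for i2 in X2 for j in Y for k in Z]
--     return Folder
-- ===== SOURCE B (Python) =====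
-- def folder_gen(fold, FileFlag):
--     sep = '' if FileFlag == True else '/'
--
--     def build(ms):
--         if not ms:
--             return []
--         return [sep.join(['Long', ms[0], 'Darcy', fold])] + build(ms[1:])
--
--     return build(['HLdynamic', 'HLSigfus', 'Barnola1991', 'Goujon2003'])
-- ===== Notes on version B (the rewrite author's own statement) =====
-- stated objective: alternative
-- what changed: Replaces the Cartesian-product comprehension over per-element-sliced lists by a recursive walk over the four middle names that assembles each path with sep.join over a parts list, the separator chosen once from the flag.
import Mathlib
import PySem

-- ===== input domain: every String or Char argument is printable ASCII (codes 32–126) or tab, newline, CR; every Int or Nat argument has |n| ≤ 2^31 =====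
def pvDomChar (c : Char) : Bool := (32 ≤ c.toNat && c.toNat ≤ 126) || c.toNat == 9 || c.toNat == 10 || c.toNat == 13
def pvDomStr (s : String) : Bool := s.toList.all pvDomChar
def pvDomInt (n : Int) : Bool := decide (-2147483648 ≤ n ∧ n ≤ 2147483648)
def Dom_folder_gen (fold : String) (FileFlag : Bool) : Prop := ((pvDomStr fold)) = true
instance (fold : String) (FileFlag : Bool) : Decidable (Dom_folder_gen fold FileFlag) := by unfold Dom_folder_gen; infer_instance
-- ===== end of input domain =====

-- B: recursion over the four middle names, each path assembled with sep.join over a parts list (objective: alternative).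
-- ===== PORT A =====
def folder_gen (fold : String) (FileFlag : Bool) : List String :=
  let X := ["Long/"]
  let X2 := ["HLdynamic/", "HLSigfus/", "Barnola1991/", "Goujon2003/"]
  let Y := ["Darcy/"]
  let X := if FileFlag == true then X.map (fun x => PySem.Str.slice x none (some (-1))) else X
  let X2 := if FileFlag == true then X2.map (fun x => PySem.Str.slice x none (some (-1))) else X2
  let Y := if FileFlag == true then Y.map (fun x => PySem.Str.slice x none (some (-1))) else Y
  let Z := [fold]
  X.flatMap (fun i => X2.flatMap (fun i2 => Y.flatMap (fun j => Z.map (fun k => i ++ i2 ++ j ++ k))))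

-- ===== PORT B =====
def folder_gen_alt_build (sep fold : String) : List String → List String
  | [] => []
  | m :: ms => PySem.Str.join sep ["Long", m, "Darcy", fold] :: folder_gen_alt_build sep fold ms

def folder_gen_alt (fold : String) (FileFlag : Bool) : List String :=
  let sep := if FileFlag == true then "" else "/"
  folder_gen_alt_build sep fold ["HLdynamic", "HLSigfus", "Barnola1991", "Goujon2003"]

-- ===== PRECONDITION & SPEC =====
def Spec_folder_gen (fold : String) (FileFlag : Bool) (out : List String) : Prop := out = folder_gen_alt fold FileFlag
instance (fold : String) (FileFlag : Bool) (out : List String) : Decidable (Spec_folder_gen fold FileFlag out) := by unfold Spec_folder_gen; infer_instance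

-- ===== CLAIM =====
def Claim_equal_folder_gen : Prop := ∀ (fold : String) (FileFlag : Bool), Dom_folder_gen fold FileFlag → Spec_folder_gen fold FileFlag (folder_gen fold FileFlag)

-- ===== LEMMAS AND PROOFS =====
theorem pvSlice1 : PySem.Str.slice "Long/" none (some (-1)) = "Long" := by rfl
theorem pvSlice2 : PySem.Str.slice "HLdynamic/" none (some (-1)) = "HLdynamic" := by rfl
theorem pvSlice3 : PySem.Str.slice "HLSigfus/" none (some (-1)) = "HLSigfus" := by rfl
theorem pvSlice4 : PySem.Str.slice "Barnola1991/" none (some (-1)) = "Barnola1991" := by rfl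
theorem pvSlice5 : PySem.Str.slice "Goujon2003/" none (some (-1)) = "Goujon2003" := by rfl
theorem pvSlice6 : PySem.Str.slice "Darcy/" none (some (-1)) = "Darcy" := by rfl

-- ===== VERDICT =====
set_option maxRecDepth 4000 in
theorem folder_gen_spec : Claim_equal_folder_gen := by
  intro fold FileFlag _
  unfold Spec_folder_gen folder_gen folder_gen_alt folder_gen_alt_build
  cases FileFlag <;>
    simp [folder_gen_alt_build, pvSlice1, pvSlice2, pvSlice3, pvSlice4, pvSlice5, pvSlice6,
      PySem.Str.join, PySem.Chars.join, List.intercalate, List.intersperse,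
      String.ext_iff]
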